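-- pv_equiv track=rewrite | github.com/naobservatory/mgs-workflow | modules/local/annotateVirusInfection/resources/usr/bin/annotate-viral-hosts.py | add_descendants
-- ===== SOURCE A (Python) =====
-- from typing import Dict, Set, List
--
-- def add_descendants(virus_tree: Dict[str, Set[str]],
--                     taxids_start: Set[str]) -> Set[str]:
--     """
--     Given a viral taxonomy tree and a set of starting taxids, return a set
--     containing those taxids and all their descendants.
--
--     Args:
--         virus_tree (Dict[str, Set[str]]): Viral taxonomic tree,
--             generated from a viral DB using build_virus_tree().
--         taxids_start (Set[str]): Initial set of taxa for which to find
--             descendants.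
--
--     Returns:
--         Set[str]: Expanded set of taxids including taxids_start and all
--             their descendants.
--     """
--     def expand_taxids(taxids):
--         new_taxids = set(taxids)
--         for taxid in taxids:
--             new_taxids.update(virus_tree.get(taxid, set()))
--         return new_taxids
--     taxids = taxids_start
--     taxids_new = expand_taxids(taxids)
--     while taxids_new > taxids:
--         taxids = taxids_new
--         taxids_new = expand_taxids(taxids)
--     return taxids_new
-- ===== SOURCE B (Python) =====
-- def add_descendants(virus_tree, taxids_start):
--     """Single-pass BFS using one list as both the visit queue and the
--     insertion record: an index pointer walks the list while newly found
--     children are appended at the end, so each node is scanned exactly once."""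
--     seen = set()
--     order = []
--     for t in taxids_start:
--         if t not in seen:
--             seen.add(t)
--             order.append(t)
--     i = 0
--     while i < len(order):
--         for c in virus_tree.get(order[i], set()):
--             if c not in seen:
--                 seen.add(c)
--                 order.append(c)
--         i += 1
--     return seen
-- ===== Notes on version B (the rewrite author's own statement) =====
-- stated objective: alternative
-- what changed: A re-expands the entire accumulated set every round until a fixpoint (re-scanning every node's children each round); B does one BFS pass over a single list that serves as both visit queue and result, an index pointer walking it while new children are appended, so each node's children are scanned exactly once.
import Mathlib
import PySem

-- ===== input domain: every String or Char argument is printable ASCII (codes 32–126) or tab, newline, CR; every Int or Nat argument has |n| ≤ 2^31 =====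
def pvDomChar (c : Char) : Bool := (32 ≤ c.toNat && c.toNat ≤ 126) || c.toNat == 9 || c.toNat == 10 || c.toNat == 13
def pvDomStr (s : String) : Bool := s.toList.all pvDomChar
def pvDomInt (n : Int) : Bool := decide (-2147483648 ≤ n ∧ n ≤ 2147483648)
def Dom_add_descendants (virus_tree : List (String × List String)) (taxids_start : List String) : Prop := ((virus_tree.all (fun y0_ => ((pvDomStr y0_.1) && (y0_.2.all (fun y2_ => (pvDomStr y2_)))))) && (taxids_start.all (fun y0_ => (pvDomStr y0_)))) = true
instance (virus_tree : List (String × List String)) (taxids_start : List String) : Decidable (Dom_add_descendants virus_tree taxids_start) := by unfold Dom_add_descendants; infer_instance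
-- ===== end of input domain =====

-- B replaces A's repeated whole-set re-expansion by a single BFS pass over one list that is both
-- the visit queue and the result: an index pointer walks it while new children are appended.
-- Both functions return a Python set; the returned lists hold its elements in the modelled first-insertion order.

-- ===== PORT A =====
-- virus_tree.get(taxid, set())
def pvChildren (virus_tree : List (String × List String)) (t : String) : List String :=
  (PySem.Dict.mk virus_tree).getD t []

-- def expand_taxids(taxids): new_taxids = set(taxids); for taxid in taxids: new_taxids.update(children); return new_taxids
def pvExpand (virus_tree : List (String × List String)) (taxids : List String) : List String :=
  taxids.foldl (fun acc t => PySem.Set.update acc (pvChildren virus_tree t)) (PySem.Set.ofList taxids)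

-- while taxids_new > taxids: … (fuel is a totality guard only; proved never exhausted)
def pvLoopA (virus_tree : List (String × List String)) : Nat → List String → List String
  | 0, taxids => taxids
  | Nat.succ fuel, taxids =>
    let taxids_new := pvExpand virus_tree taxids
    if PySem.Set.issuperset taxids_new taxids && !PySem.Set.equal taxids_new taxids then
      pvLoopA virus_tree fuel taxids_new
    else
      taxids_new

def add_descendants (virus_tree : List (String × List String)) (taxids_start : List String) : List String :=
  pvLoopA virus_tree (taxids_start.length + (virus_tree.map (fun p => p.2.length)).sum + 1) taxids_start

-- ===== PORT B =====
-- while i < len(order): for c in virus_tree.get(order[i], set()): if c not in seen: seen.add(c); order.append(c); i += 1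
-- ('order' models the set 'seen' in insertion order; fuel is a totality guard only, proved never exhausted)
def pvLoopQ (virus_tree : List (String × List String)) : Nat → List String → Nat → List String
  | 0, order, _ => order
  | Nat.succ fuel, order, i =>
    match order[i]? with
    | none => order
    | some t =>
      pvLoopQ virus_tree fuel
        (((PySem.Dict.mk virus_tree).getD t []).foldl
          (fun o c => if o.contains c then o else o ++ [c]) order)
        (i + 1)

def add_descendants_alt (virus_tree : List (String × List String)) (taxids_start : List String) : List String :=
  pvLoopQ virus_tree (taxids_start.length + (virus_tree.map (fun p => p.2.length)).sum + 1)
    (PySem.Set.ofList taxids_start) 0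

-- ===== PRECONDITION & SPEC =====
def Spec_add_descendants (virus_tree : List (String × List String)) (taxids_start : List String) (out : List String) : Prop := out = add_descendants_alt virus_tree taxids_start
instance (virus_tree : List (String × List String)) (taxids_start : List String) (out : List String) : Decidable (Spec_add_descendants virus_tree taxids_start out) := by unfold Spec_add_descendants; infer_instance

-- ===== CLAIM (what is proved, stated in full; the proofs are below) =====
def Claim_equal_add_descendants : Prop := ∀ (virus_tree : List (String × List String)) (taxids_start : List String), Dom_add_descendants virus_tree taxids_start → Spec_add_descendants virus_tree taxids_start (add_descendants virus_tree taxids_start)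

-- ===== LEMMAS AND PROOFS =====

-- proof-only middle layer: the round/frontier view of BFS, bridged to A on one side and to B's queue on the other
def pvRoundB (virus_tree : List (String × List String)) (seen frontier : List String) :
    List String × List String :=
  frontier.foldl (fun sn t =>
    (pvChildren virus_tree t).foldl (fun sn c =>
      if sn.1.contains c then sn else (sn.1 ++ [c], sn.2 ++ [c])) sn) (seen, [])

def pvLoopB (virus_tree : List (String × List String)) : Nat → List String → List String → List String
  | 0, seen, _ => seen
  | Nat.succ fuel, seen, frontier =>
    if frontier.isEmpty then seen
    else
      let p := pvRoundB virus_tree seen frontier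
      pvLoopB virus_tree fuel p.1 p.2

-- the common "expand a set by everything's children" fold
def pvF (virus_tree : List (String × List String)) (a ts : List String) : List String :=
  ts.foldl (fun acc t => PySem.Set.update acc (pvChildren virus_tree t)) a

lemma pvExpand_eq_pvF (tree : List (String × List String)) (t : List String) :
    pvExpand tree t = pvF tree (PySem.Set.ofList t) t := rfl

lemma pv_update_decomp (a cs : List String) :
    ∃ e, PySem.Set.update a cs = a ++ e ∧ ∀ x ∈ e, x ∉ a := by
  refine ⟨(PySem.Set.ofList cs).filter (fun y => !(PySem.Set.contains a y)), ?_, ?_⟩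
  · exact PySem.Set.update_eq_append_filter a cs
  · intro x hx
    have := List.of_mem_filter hx
    simpa [PySem.Set.contains_iff] using this

lemma pv_update_subset (a cs : List String) (h : ∀ c ∈ cs, c ∈ a) :
    PySem.Set.update a cs = a := by
  obtain ⟨e, he, hf⟩ := pv_update_decomp a cs
  have he' : e = [] := by
    cases e with
    | nil => rfl
    | cons x e' =>
      exfalso
      have hx : x ∈ PySem.Set.update a cs := by
        rw [he]; exact List.mem_append_right _ (List.mem_cons_self)
      rw [PySem.Set.mem_update] at hx
      rcases hx with hx | hx
      · exact hf x List.mem_cons_self hx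
      · exact hf x List.mem_cons_self (h x hx)
  rw [he, he', List.append_nil]

lemma pvF_decomp (tree : List (String × List String)) :
    ∀ (ts a : List String), ∃ e, pvF tree a ts = a ++ e ∧ ∀ x ∈ e, x ∉ a := by
  intro ts
  induction ts with
  | nil => intro a; exact ⟨[], by simp [pvF], by simp⟩
  | cons t ts ih =>
    intro a
    obtain ⟨e1, he1, hf1⟩ := pv_update_decomp a (pvChildren tree t)
    obtain ⟨e2, he2, hf2⟩ := ih (PySem.Set.update a (pvChildren tree t))
    refine ⟨e1 ++ e2, ?_, ?_⟩
    · show pvF tree (PySem.Set.update a (pvChildren tree t)) ts = a ++ (e1 ++ e2)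
      rw [he2, he1, List.append_assoc]
    · intro x hx
      rcases List.mem_append.1 hx with h | h
      · exact hf1 x h
      · intro hxa
        exact hf2 x h (by rw [he1]; exact List.mem_append_left _ hxa)

lemma mem_pvF (tree : List (String × List String)) (ts a : List String) {x : String}
    (hx : x ∈ a) : x ∈ pvF tree a ts := by
  obtain ⟨e, he, -⟩ := pvF_decomp tree ts a
  rw [he]; exact List.mem_append_left _ hx

lemma pvF_covered (tree : List (String × List String)) :
    ∀ (ts a : List String) (t : String), t ∈ ts →
      ∀ c ∈ pvChildren tree t, c ∈ pvF tree a ts := by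
  intro ts
  induction ts with
  | nil => intro a t h; simp at h
  | cons u ts ih =>
    intro a t ht c hc
    rcases List.mem_cons.1 ht with rfl | ht
    · exact mem_pvF tree ts _ (by rw [PySem.Set.mem_update]; exact Or.inr hc)
    · exact ih _ t ht c hc

lemma pvF_skip (tree : List (String × List String)) :
    ∀ (ts a : List String), (∀ t ∈ ts, ∀ c ∈ pvChildren tree t, c ∈ a) →
      pvF tree a ts = a := by
  intro ts
  induction ts with
  | nil => intro a _; rfl
  | cons t ts ih =>
    intro a h
    have hsub : PySem.Set.update a (pvChildren tree t) = a :=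
      pv_update_subset a _ (h t List.mem_cons_self)
    show pvF tree (PySem.Set.update a (pvChildren tree t)) ts = a
    rw [hsub]
    exact ih a (fun u hu => h u (List.mem_cons_of_mem _ hu))

lemma nodup_pvF (tree : List (String × List String)) :
    ∀ (ts a : List String), a.Nodup → (pvF tree a ts).Nodup := by
  intro ts
  induction ts with
  | nil => intro a h; exact h
  | cons t ts ih => intro a h; exact ih _ (PySem.Set.nodup_update _ _ h)

lemma pvF_mem_U (tree : List (String × List String)) (U : List String)
    (hU : ∀ s : String, ∀ c ∈ pvChildren tree s, c ∈ U) :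
    ∀ (ts a : List String), (∀ x ∈ a, x ∈ U) → ∀ x ∈ pvF tree a ts, x ∈ U := by
  intro ts
  induction ts with
  | nil => intro a ha; exact ha
  | cons t ts ih =>
    intro a ha x hx
    refine ih _ ?_ x hx
    intro y hy
    rw [PySem.Set.mem_update] at hy
    rcases hy with hy | hy
    · exact ha y hy
    · exact hU t y hy

-- folding duplicate sources is a no-op: pvF over a list = pvF over its deduplication
lemma pvF_dedup_aux (tree : List (String × List String)) :
    ∀ (l a p : List String), (∀ t ∈ p, ∀ c ∈ pvChildren tree t, c ∈ a) →
      pvF tree a ((PySem.Set.update p l).drop p.length) = pvF tree a l := by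
  intro l
  induction l with
  | nil =>
    intro a p _
    show pvF tree a ((PySem.Set.update p []).drop p.length) = pvF tree a []
    have : PySem.Set.update p ([] : List String) = p := rfl
    rw [this, List.drop_length]
  | cons x l ih =>
    intro a p hp
    have hstep : PySem.Set.update p (x :: l) = PySem.Set.update (PySem.Set.add p x) l :=
      PySem.Set.update_cons p x l
    by_cases hx : x ∈ p
    · have hadd : PySem.Set.add p x = p := PySem.Set.add_of_mem hx
      have hR : pvF tree a (x :: l) = pvF tree a l := by
        show pvF tree (PySem.Set.update a (pvChildren tree x)) l = pvF tree a l
        rw [pv_update_subset a _ (hp x hx)]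
      rw [hstep, hadd, hR]
      exact ih a p hp
    · have hadd : PySem.Set.add p x = p ++ [x] := PySem.Set.add_of_not_mem hx
      obtain ⟨e, he, -⟩ := pv_update_decomp (p ++ [x]) l
      have hd1 : ((p ++ [x]) ++ e).drop (p ++ [x]).length = e := List.drop_left
      have hd2 : ((p ++ [x]) ++ e).drop p.length = x :: e := by
        rw [List.append_assoc, List.singleton_append, List.drop_left' rfl]
      rw [hstep, hadd, he, hd2]
      show pvF tree (PySem.Set.update a (pvChildren tree x)) e
          = pvF tree a (x :: l)
      have hp' : ∀ t ∈ p ++ [x], ∀ c ∈ pvChildren tree t,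
          c ∈ PySem.Set.update a (pvChildren tree x) := by
        intro t ht c hc
        rcases List.mem_append.1 ht with ht | ht
        · rw [PySem.Set.mem_update]; exact Or.inl (hp t ht c hc)
        · rw [List.mem_singleton] at ht; subst ht
          rw [PySem.Set.mem_update]; exact Or.inr hc
      have := ih (PySem.Set.update a (pvChildren tree x)) (p ++ [x]) hp'
      rw [he, hd1] at this
      exact this

lemma pv_inner_round :
    ∀ (cs a n : List String),
      cs.foldl (fun sn c => if sn.1.contains c then sn else (sn.1 ++ [c], sn.2 ++ [c])) (a, n)
        = (PySem.Set.update a cs, n ++ (PySem.Set.update a cs).drop a.length) := by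
  intro cs
  induction cs with
  | nil => intro a n; simp [PySem.Set.update]
  | cons c cs ih =>
    intro a n
    by_cases hc : c ∈ a
    · have hcontains : a.contains c = true := by simpa using hc
      have hupd : PySem.Set.update a (c :: cs) = PySem.Set.update a cs := by
        rw [PySem.Set.update_cons, PySem.Set.add_of_mem hc]
      simp only [List.foldl_cons, hcontains, if_true, hupd]
      exact ih a n
    · have hcontains : a.contains c = false := by simpa using hc
      have hupd : PySem.Set.update a (c :: cs) = PySem.Set.update (a ++ [c]) cs := by
        rw [PySem.Set.update_cons, PySem.Set.add_of_not_mem hc]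
      obtain ⟨e, he, -⟩ := pv_update_decomp (a ++ [c]) cs
      have hd1 : ((a ++ [c]) ++ e).drop (a ++ [c]).length = e := List.drop_left
      have hd2 : ((a ++ [c]) ++ e).drop a.length = c :: e := by
        rw [List.append_assoc, List.singleton_append, List.drop_left' rfl]
      simp only [List.foldl_cons, hcontains, Bool.false_eq_true, if_false, hupd]
      rw [ih (a ++ [c]) (n ++ [c]), he, hd1, hd2]
      simp [List.append_assoc]

lemma pv_outer_round (tree : List (String × List String)) :
    ∀ (ts a n : List String),
      ts.foldl (fun sn t =>
          (pvChildren tree t).foldl (fun sn c =>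
            if sn.1.contains c then sn else (sn.1 ++ [c], sn.2 ++ [c])) sn) (a, n)
        = (pvF tree a ts, n ++ (pvF tree a ts).drop a.length) := by
  intro ts
  induction ts with
  | nil => intro a n; simp [pvF]
  | cons t ts ih =>
    intro a n
    simp only [List.foldl_cons]
    rw [pv_inner_round (pvChildren tree t) a n]
    rw [ih (PySem.Set.update a (pvChildren tree t)) _]
    obtain ⟨e1, he1, -⟩ := pv_update_decomp a (pvChildren tree t)
    obtain ⟨e2, he2, -⟩ := pvF_decomp tree ts (PySem.Set.update a (pvChildren tree t))
    have hF : pvF tree a (t :: ts) = pvF tree (PySem.Set.update a (pvChildren tree t)) ts := rfl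
    rw [hF, he2, he1]
    have hd1 : ((a ++ e1) ++ e2).drop (a ++ e1).length = e2 := List.drop_left
    have hd2 : (a ++ e1).drop a.length = e1 := List.drop_left
    have hd3 : ((a ++ e1) ++ e2).drop a.length = e1 ++ e2 := by
      rw [List.append_assoc, List.drop_left]
    rw [hd1, hd2, hd3]
    simp [List.append_assoc]

lemma pvRoundB_eq (tree : List (String × List String)) (a f : List String) :
    pvRoundB tree a f = (pvF tree a f, (pvF tree a f).drop a.length) := by
  have := pv_outer_round tree f a []
  simpa [pvRoundB] using this

lemma pv_len_le (a U : List String) (hnd : a.Nodup) (ha : ∀ x ∈ a, x ∈ U) :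
    a.length ≤ U.length := by
  have h1 : a.toFinset.card = a.length := List.toFinset_card_of_nodup hnd
  have h2 : a.toFinset ⊆ U.toFinset := by
    intro x hx
    rw [List.mem_toFinset] at hx ⊢
    exact ha x hx
  calc a.length = a.toFinset.card := h1.symm
    _ ≤ U.toFinset.card := Finset.card_le_card h2
    _ ≤ U.length := U.toFinset_card_le

lemma pv_children_sub (tree : List (String × List String)) (s : String) :
    ∀ c ∈ pvChildren tree s, ∃ p ∈ tree, c ∈ p.2 := by
  induction tree with
  | nil =>
    intro c hc
    simp [pvChildren, PySem.Dict.getD, PySem.Dict.get?] at hc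
  | cons p tree ih =>
    intro c hc
    rw [pvChildren, PySem.Dict.getD_eq_get?_getD] at hc
    rcases p with ⟨k, v⟩
    rw [PySem.Dict.get?_mk_cons] at hc
    by_cases hk : k == s
    · rw [if_pos hk] at hc
      exact ⟨(k, v), List.mem_cons_self, by simpa using hc⟩
    · rw [if_neg hk] at hc
      have hmem : c ∈ pvChildren tree s := by
        rw [pvChildren, PySem.Dict.getD_eq_get?_getD]; exact hc
      obtain ⟨q, hq, hcq⟩ := ih c hmem
      exact ⟨q, List.mem_cons_of_mem _ hq, hcq⟩

-- the A-side simulation: A's fixpoint loop (state t) equals the round loop (state seen = a, frontier = f)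
lemma pvMain (tree : List (String × List String)) (U : List String)
    (hU : ∀ s : String, ∀ c ∈ pvChildren tree s, c ∈ U) :
    ∀ (fa fb : Nat) (t a f : List String),
      a.Nodup →
      PySem.Set.ofList t = a →
      (∀ x ∈ a, x ∈ U) →
      (∀ x ∈ t, x ∉ f → ∀ c ∈ pvChildren tree x, c ∈ a) →
      pvF tree a t = pvF tree a f →
      U.length + 1 ≤ fa + a.length →
      U.length + 2 ≤ fb + a.length →
      pvLoopA tree fa t = pvLoopB tree fb a f := by
  intro fa
  induction fa with
  | zero =>
    intro fb t a f hnd hof ha hcov hfold hfa hfb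
    exact absurd hfa (by have := pv_len_le a U hnd ha; omega)
  | succ fa ih =>
    intro fb t a f hnd hof ha hcov hfold hfa hfb
    have hlen := pv_len_le a U hnd ha
    obtain ⟨fb', rfl⟩ : ∃ fb', fb = fb' + 1 := ⟨fb - 1, by omega⟩
    have hmemta : ∀ x, x ∈ t ↔ x ∈ a := by
      intro x; rw [← hof, PySem.Set.mem_ofList]
    have hnew : pvExpand tree t = pvF tree a f := by
      rw [pvExpand_eq_pvF, hof, hfold]
    obtain ⟨e, hdec, hfresh⟩ := pvF_decomp tree f a
    by_cases hf : f = []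
    · subst hf
      have hFnil : pvF tree a ([] : List String) = a := rfl
      have heq : PySem.Set.equal (pvExpand tree t) t = true := by
        rw [PySem.Set.equal_iff]
        intro x
        rw [hnew, hFnil]
        exact (hmemta x).symm
      show (if PySem.Set.issuperset (pvExpand tree t) t && !PySem.Set.equal (pvExpand tree t) t then
              pvLoopA tree fa (pvExpand tree t) else pvExpand tree t) = pvLoopB tree (fb' + 1) a []
      rw [heq]
      simp only [Bool.not_true, Bool.and_false, Bool.false_eq_true, if_false]
      rw [hnew, hFnil]
      rfl
    · have hfe : f.isEmpty = false := by
        cases f with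
        | nil => exact absurd rfl hf
        | cons x f' => rfl
      have hround : pvRoundB tree a f = (a ++ e, e) := by
        rw [pvRoundB_eq, hdec, List.drop_left]
      cases e with
      | nil =>
        rw [List.append_nil] at hdec
        have heq : PySem.Set.equal (pvExpand tree t) t = true := by
          rw [PySem.Set.equal_iff]
          intro x
          rw [hnew, hdec]
          exact (hmemta x).symm
        obtain ⟨fb'', rfl⟩ : ∃ fb'', fb' = fb'' + 1 := ⟨fb' - 1, by omega⟩
        show (if PySem.Set.issuperset (pvExpand tree t) t && !PySem.Set.equal (pvExpand tree t) t then
                pvLoopA tree fa (pvExpand tree t) else pvExpand tree t) = pvLoopB tree (fb'' + 1 + 1) a f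
        rw [heq]
        simp only [Bool.not_true, Bool.and_false, Bool.false_eq_true, if_false]
        rw [hnew, hdec]
        show a = pvLoopB tree (fb'' + 1 + 1) a f
        rw [pvLoopB, hfe]
        simp only [Bool.false_eq_true, if_false]
        rw [hround]
        show a = pvLoopB tree (fb'' + 1) (a ++ []) []
        rw [List.append_nil]
        rfl
      | cons x e' =>
        have hxa : x ∉ a := hfresh x List.mem_cons_self
        have hsup : PySem.Set.issuperset (pvExpand tree t) t = true := by
          rw [PySem.Set.issuperset_iff]
          intro y hy
          rw [hnew, hdec]
          exact List.mem_append_left _ ((hmemta y).1 hy)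
        have hneq : PySem.Set.equal (pvExpand tree t) t = false := by
          rw [← Bool.not_eq_true, PySem.Set.equal_iff]
          intro hall
          have hx : x ∈ pvExpand tree t := by
            rw [hnew, hdec]
            exact List.mem_append_right _ List.mem_cons_self
          exact hxa ((hmemta x).1 ((hall x).1 hx))
        have hcov' : ∀ y ∈ a, ∀ c ∈ pvChildren tree y, c ∈ pvF tree a f := by
          intro y hy c hc
          by_cases hyf : y ∈ f
          · exact pvF_covered tree f a y hyf c hc
          · have hca : c ∈ a := hcov y ((hmemta y).2 hy) hyf c hc
            rw [hdec]; exact List.mem_append_left _ hca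
        have hnodupnew : (pvF tree a f).Nodup := nodup_pvF tree f a hnd
        have hskip : pvF tree (pvF tree a f) a = pvF tree a f := by
          apply pvF_skip
          intro y hy c hc
          exact hcov' y hy c hc
        have IH := ih fb' (pvF tree a f) (pvF tree a f) (x :: e')
          hnodupnew
          (PySem.Set.ofList_eq_self_of_nodup _ hnodupnew)
          (pvF_mem_U tree U hU f a ha)
          (by
            intro y hy hynf c hc
            have hya : y ∈ a := by
              rw [hdec] at hy
              rcases List.mem_append.1 hy with h | h
              · exact h
              · exact absurd h hynf
            exact hcov' y hya c hc)
          (by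
            have happ : ∀ (X l1 l2 : List String),
                pvF tree X (l1 ++ l2) = pvF tree (pvF tree X l1) l2 :=
              fun X l1 l2 => List.foldl_append
            nth_rewrite 2 [hdec]
            rw [happ, hskip])
          (by
            have hl : (pvF tree a f).length = a.length + (x :: e').length := by
              rw [hdec, List.length_append]
            have hxl : 1 ≤ (x :: e').length := by simp
            omega)
          (by
            have hl : (pvF tree a f).length = a.length + (x :: e').length := by
              rw [hdec, List.length_append]
            have hxl : 1 ≤ (x :: e').length := by simp
            omega)
        show (if PySem.Set.issuperset (pvExpand tree t) t && !PySem.Set.equal (pvExpand tree t) t then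
                pvLoopA tree fa (pvExpand tree t) else pvExpand tree t) = pvLoopB tree (fb' + 1) a f
        rw [hsup, hneq]
        simp only [Bool.not_false, Bool.and_true]
        rw [pvLoopB, hfe]
        simp only [Bool.false_eq_true, if_false]
        rw [hround]
        show pvLoopA tree fa (pvExpand tree t) = pvLoopB tree fb' (a ++ (x :: e')) (x :: e')
        rw [hnew, show a ++ (x :: e') = pvF tree a f from hdec.symm]
        exact IH

-- B-side: the inner fold of the queue loop is exactly a set update
lemma pvQstep_eq (o cs : List String) :
    cs.foldl (fun o c => if o.contains c then o else o ++ [c]) o = PySem.Set.update o cs := by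
  induction cs generalizing o with
  | nil => rfl
  | cons c cs ih =>
    by_cases hc : c ∈ o
    · have hcontains : o.contains c = true := by simpa using hc
      simp only [List.foldl_cons, hcontains, if_true,
        PySem.Set.update_cons, PySem.Set.add_of_mem hc]
      exact ih o
    · have hcontains : o.contains c = false := by simpa using hc
      simp only [List.foldl_cons, hcontains, Bool.false_eq_true, if_false,
        PySem.Set.update_cons, PySem.Set.add_of_not_mem hc]
      exact ih (o ++ [c])

-- B-side: one whole pending block of the queue loop performs the pvF fold over that block
lemma pvQblock (tree : List (String × List String)) :
    ∀ (f a g : List String) (fq : Nat),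
      pvLoopQ tree (f.length + fq) (a ++ (f ++ g)) a.length
        = pvLoopQ tree fq (pvF tree (a ++ (f ++ g)) f) (a.length + f.length) := by
  intro f
  induction f with
  | nil => intro a g fq; simp [pvF]
  | cons t f ih =>
    intro a g fq
    have hget : (a ++ (t :: f ++ g))[a.length]? = some t := by
      rw [List.getElem?_append_right (Nat.le_refl _)]
      simp
    have hfuel : (t :: f).length + fq = (f.length + fq) + 1 := by
      simp [Nat.add_assoc, Nat.add_comm]
    rw [hfuel, pvLoopQ, hget]
    simp only
    rw [pvQstep_eq]
    have hch : (PySem.Dict.mk tree).getD t [] = pvChildren tree t := rfl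
    rw [hch]
    obtain ⟨e1, he1, -⟩ := pv_update_decomp (a ++ (t :: f ++ g)) (pvChildren tree t)
    have hshape : PySem.Set.update (a ++ (t :: f ++ g)) (pvChildren tree t)
        = (a ++ [t]) ++ (f ++ (g ++ e1)) := by
      rw [he1]
      simp [List.append_assoc]
    rw [hshape]
    have hidx : a.length + 1 = (a ++ [t]).length := by simp
    rw [hidx]
    rw [ih (a ++ [t]) (g ++ e1) fq]
    have hF : pvF tree ((a ++ [t]) ++ (f ++ (g ++ e1))) f
        = pvF tree (a ++ (t :: f ++ g)) (t :: f) := by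
      show _ = pvF tree (PySem.Set.update (a ++ (t :: f ++ g)) (pvChildren tree t)) f
      rw [hshape]
    rw [hF]
    have hlen : (a ++ [t]).length + f.length = a.length + (t :: f).length := by
      simp; omega
    rw [hlen]

-- B-side: the queue loop equals the round loop when the frontier is the pending suffix
lemma pvQmain (tree : List (String × List String)) (U : List String)
    (hU : ∀ s : String, ∀ c ∈ pvChildren tree s, c ∈ U) :
    ∀ (fb fq : Nat) (a f : List String),
      (a ++ f).Nodup →
      (∀ x ∈ a ++ f, x ∈ U) →
      U.length + 1 ≤ fq + a.length →
      U.length + 2 ≤ fb + a.length →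
      pvLoopQ tree fq (a ++ f) a.length = pvLoopB tree fb (a ++ f) f := by
  intro fb
  induction fb with
  | zero =>
    intro fq a f hnd hsub hfq hfb
    have h1 : a.length ≤ (a ++ f).length := by simp
    have h2 := pv_len_le (a ++ f) U hnd hsub
    omega
  | succ fb ih =>
    intro fq a f hnd hsub hfq hfb
    have hlen := pv_len_le (a ++ f) U hnd hsub
    have hal : a.length + f.length ≤ U.length := by
      have : (a ++ f).length = a.length + f.length := by simp
      omega
    cases f with
    | nil =>
      obtain ⟨fq', rfl⟩ : ∃ fq', fq = fq' + 1 := ⟨fq - 1, by omega⟩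
      show pvLoopQ tree (fq' + 1) (a ++ []) a.length = pvLoopB tree (fb + 1) (a ++ []) []
      rw [List.append_nil, pvLoopQ]
      have hnone : a[a.length]? = none := by
        simp
      rw [hnone]
      rfl
    | cons t f =>
      obtain ⟨fq', rfl⟩ : ∃ fq', fq = (t :: f).length + fq' := ⟨fq - (t :: f).length, by
        simp only [List.length_cons] at hal hfq ⊢; omega⟩
      obtain ⟨e, hdec, -⟩ := pvF_decomp tree (t :: f) (a ++ (t :: f))
      have hblock := pvQblock tree (t :: f) a [] fq'
      rw [List.append_nil] at hblock
      rw [hblock]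
      -- the round side
      show _ = pvLoopB tree (fb + 1) (a ++ (t :: f)) (t :: f)
      rw [pvLoopB]
      simp only [List.isEmpty_cons, Bool.false_eq_true, if_false]
      rw [pvRoundB_eq, hdec]
      have hdrop : ((a ++ (t :: f)) ++ e).drop (a ++ (t :: f)).length = e := List.drop_left
      rw [hdrop]
      simp only
      have hidx : a.length + (t :: f).length = (a ++ (t :: f)).length := by simp
      rw [hidx]
      have hnd' : ((a ++ (t :: f)) ++ e).Nodup := by
        rw [← hdec]; exact nodup_pvF tree (t :: f) (a ++ (t :: f)) hnd
      have hsub' : ∀ x ∈ (a ++ (t :: f)) ++ e, x ∈ U := by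
        rw [← hdec]; exact pvF_mem_U tree U hU (t :: f) (a ++ (t :: f)) hsub
      have := ih fq' (a ++ (t :: f)) e hnd' hsub'
        (by simp only [List.length_append, List.length_cons] at hfq ⊢; omega)
        (by simp only [List.length_append, List.length_cons] at hfb ⊢; omega)
      exact this

-- ===== VERDICT (by name: the statement is the Claim_ definition above) =====
theorem add_descendants_spec : Claim_equal_add_descendants := by
  intro tree starts _
  show add_descendants tree starts = add_descendants_alt tree starts
  unfold add_descendants add_descendants_alt
  have hUdef : (starts ++ tree.flatMap (fun p => p.2)).length
      = starts.length + (tree.map (fun p => p.2.length)).sum := by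
    rw [List.length_append, List.length_flatMap]
  have hU : ∀ s : String, ∀ c ∈ pvChildren tree s, c ∈ starts ++ tree.flatMap (fun p => p.2) := by
    intro s c hc
    obtain ⟨p, hp, hcp⟩ := pv_children_sub tree s c hc
    exact List.mem_append_right _ (List.mem_flatMap.2 ⟨p, hp, hcp⟩)
  have hndS : (PySem.Set.ofList starts).Nodup := PySem.Set.nodup_ofList starts
  have hsubS : ∀ x ∈ PySem.Set.ofList starts, x ∈ starts ++ tree.flatMap (fun p => p.2) := by
    intro x hx
    exact List.mem_append_left _ ((PySem.Set.mem_ofList starts x).1 hx)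
  set U := starts ++ tree.flatMap (fun p => p.2) with hUset
  set FB := U.length + 2 with hFB
  -- A's loop = round loop (frontier = the deduplicated start set)
  have hA : pvLoopA tree (starts.length + (tree.map (fun p => p.2.length)).sum + 1) starts
      = pvLoopB tree FB (PySem.Set.ofList starts) (PySem.Set.ofList starts) := by
    apply pvMain tree U hU
    · exact hndS
    · rfl
    · exact hsubS
    · intro x hx hxf
      exact absurd ((PySem.Set.mem_ofList starts x).2 hx) hxf
    · -- pvF a starts = pvF a (ofList starts): duplicates in 'starts' contribute nothing
      have := pvF_dedup_aux tree starts (PySem.Set.ofList starts) [] (by intro t ht; simp at ht)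
      simpa [PySem.Set.ofList_eq_foldl, PySem.Set.update] using this.symm

    · omega
    · omega
  -- B's queue loop = round loop (processed prefix empty, pending = everything)
  have hB : pvLoopQ tree (starts.length + (tree.map (fun p => p.2.length)).sum + 1)
        (PySem.Set.ofList starts) 0
      = pvLoopB tree FB (PySem.Set.ofList starts) (PySem.Set.ofList starts) := by
    have := pvQmain tree U hU FB
      (starts.length + (tree.map (fun p => p.2.length)).sum + 1)
      [] (PySem.Set.ofList starts)
      (by simpa using hndS) (by simp only [List.nil_append]; exact hsubS)
      (by simp; omega) (by omega)
    simp only [List.nil_append, List.length_nil] at this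
    exact this
  rw [hA, ← hB]
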